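-- pv_equiv track=rewrite | github.com/ayukyo/alltoolkit | Python/l_system_utils/mod.py | get_string_length
-- ===== SOURCE A (Python) =====
-- from typing import Dict, List, Tuple, Optional, Callable, Union
--
-- def get_string_length(axiom: str, rules: Dict[str, str], iterations: int) -> int:
--     """
--     Calculate the expected string length without generating it.
--
--     Uses the growth matrix method for D0L systems.
--
--     Args:
--         axiom: Starting string
--         rules: Production rules
--         iterations: Number of iterations
--
--     Returns:
--         Expected string length
--     """
--     # Get all unique symbols
--     symbols = set(axiom)
--     for pred, succ in rules.items():
--         symbols.add(pred)
--         symbols.update(succ)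
--
--     # Build growth matrix
--     symbols = sorted(symbols)
--     n = len(symbols)
--
--     if n == 0:
--         return len(axiom)
--
--     # Growth rates for each symbol
--     growth_rates = {}
--     for sym in symbols:
--         if sym in rules:
--             growth_rates[sym] = len(rules[sym])
--         else:
--             growth_rates[sym] = 1
--
--     # Calculate string length
--     current_counts = {sym: axiom.count(sym) for sym in symbols}
--
--     for _ in range(iterations):
--         new_counts = {sym: 0 for sym in symbols}
--         for sym in symbols:
--             if sym in rules:
--                 successor = rules[sym]
--                 for c in successor:
--                     if c in new_counts:
--                         new_counts[c] += current_counts[sym]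
--             else:
--                 new_counts[sym] += current_counts[sym]
--         current_counts = new_counts
--
--     return sum(current_counts.values())
-- ===== SOURCE B (Python) =====
-- def get_string_length(axiom: str, rules, iterations: int) -> int:
--     """Growth-matrix exponentiation by squaring, restricted to the producible alphabet."""
--     symbols = set(axiom)
--     for pred, succ in rules.items():
--         symbols.add(pred)
--         symbols.update(succ)
--     symbols = sorted(symbols)
--     if not symbols:
--         return len(axiom)
--     counts = {s: axiom.count(s) for s in symbols}
--     if iterations <= 0:
--         return sum(counts.values())
--     # only characters occurring in some successor can ever be produced
--     produced = {c for succ in rules.values() for c in succ}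
--     prod = [s for s in symbols if s in produced]
--     m = len(prod)
--     # one rewriting step seeds the producible subsystem
--     w = [sum(_yields(rules, c, s) * counts[s] for s in symbols) for c in prod]
--     # the growth matrix is closed on the producible symbols; power it by squaring
--     M = [[_yields(rules, c, d) for d in prod] for c in prod]
--     P = _mat_pow(M, iterations - 1)
--     total = sum(P[i][j] * w[j] for i in range(m) for j in range(m))
--     # a symbol that is never produced and has no rule keeps its count forever
--     total += sum(counts[s] for s in symbols if s not in produced and s not in rules)
--     return total
--
--
-- def _yields(rules, c, d):
--     """How many copies of symbol c one symbol d yields in a single rewriting step."""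
--     if d in rules:
--         return sum(1 for ch in rules[d] if ch == c)
--     return 1 if c == d else 0
--
--
-- def _mat_mul(A, B):
--     n = len(A)
--     return [[sum(A[i][t] * B[t][j] for t in range(n)) for j in range(n)]
--             for i in range(n)]
--
--
-- def _mat_pow(M, k):
--     n = len(M)
--     R = [[1 if i == j else 0 for j in range(n)] for i in range(n)]
--     while k > 0:
--         if k % 2 == 1:
--             R = _mat_mul(R, M)
--         M = _mat_mul(M, M)
--         k //= 2
--     return R
-- ===== Notes on version B (the rewrite author's own statement) =====
-- stated objective: faster
-- what changed: A updates a per-symbol count dictionary once per iteration; B builds the growth matrix restricted to the producible symbols (characters occurring in some successor; never-produced rule-less symbols are fixed, never-produced rule keys fire once), raises it to the iteration count by exponentiation-by-squaring, and applies it to the one-step-seeded counts.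
import Mathlib
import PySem

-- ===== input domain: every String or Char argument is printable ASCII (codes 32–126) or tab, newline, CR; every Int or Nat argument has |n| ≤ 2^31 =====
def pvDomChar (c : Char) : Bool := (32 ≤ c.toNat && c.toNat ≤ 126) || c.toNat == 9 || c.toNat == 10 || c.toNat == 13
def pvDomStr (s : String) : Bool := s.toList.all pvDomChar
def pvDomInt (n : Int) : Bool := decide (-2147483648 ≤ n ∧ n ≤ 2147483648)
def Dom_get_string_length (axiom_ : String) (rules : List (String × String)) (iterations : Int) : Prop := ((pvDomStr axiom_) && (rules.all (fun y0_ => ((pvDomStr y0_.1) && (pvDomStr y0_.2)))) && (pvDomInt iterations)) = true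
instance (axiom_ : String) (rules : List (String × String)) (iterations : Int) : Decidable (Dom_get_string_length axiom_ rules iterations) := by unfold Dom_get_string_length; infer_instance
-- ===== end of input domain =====

-- B replaces A's per-iteration count-dictionary updates by exponentiation-by-squaring of the
-- growth matrix restricted to the producible symbols; same value everywhere.

-- a single Python character as the 1-character string it compares equal to
def pvCh (c : Char) : String := String.ofList [c]

-- shared by both ports: sorted(set(axiom) ∪ rule keys ∪ chars of rule values) — identical code in Source A and Source B
def pvSymbols (axiom_ : String) (rules : List (String × String)) : List String :=
  let s0 : PySem.Set String := PySem.Set.ofList (axiom_.toList.map pvCh)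
  let s1 : PySem.Set String := rules.foldl
    (fun s p => PySem.Set.update (PySem.Set.add s p.1) (p.2.toList.map pvCh)) s0
  PySem.List.sorted s1 (fun x => x) false

-- ===== PORT A =====
-- one pass of A's counting loop: new_counts built from current_counts
def pvStepA (syms : List String) (rd : PySem.Dict String String)
    (cur : PySem.Dict String Int) : PySem.Dict String Int :=
  let new0 : PySem.Dict String Int := syms.foldl (fun d sym => d.insert sym 0) PySem.Dict.empty
  syms.foldl (fun nc sym =>
    match rd.get? sym with
    | some succ =>
        succ.toList.foldl (fun nc2 ch =>
          if nc2.contains (pvCh ch) then nc2.modify (pvCh ch) 0 (· + cur.getD sym 0) else nc2) nc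
    | none => nc.modify sym 0 (· + cur.getD sym 0)) new0

def get_string_length (axiom_ : String) (rules : List (String × String)) (iterations : Int) : Int :=
  let syms := pvSymbols axiom_ rules
  if syms.length = 0 then (PySem.Str.len axiom_ : Int)
  else
    let rd : PySem.Dict String String := PySem.Dict.mk rules
    let _growth_rates : PySem.Dict String Int := syms.foldl (fun d sym =>
      match rd.get? sym with
      | some succ => d.insert sym (PySem.Str.len succ : Int)
      | none => d.insert sym 1) PySem.Dict.empty
    let init : PySem.Dict String Int :=
      syms.foldl (fun d sym => d.insert sym (PySem.Str.count axiom_ sym : Int)) PySem.Dict.empty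
    ((List.range iterations.toNat).foldl (fun cur _ => pvStepA syms rd cur) init).values.sum

-- ===== PORT B =====
-- _yields(rules, c, d): how many copies of c one d yields in a single rewriting step
def pvYields (rd : PySem.Dict String String) (c d : String) : Int :=
  match rd.get? d with
  | some succ => (succ.toList.countP (fun ch => pvCh ch == c) : Int)
  | none => if c = d then 1 else 0

-- {c for succ in rules.values() for c in succ}
def pvProdSet (rd : PySem.Dict String String) : PySem.Set String :=
  PySem.Set.ofList (rd.values.flatMap (fun v => v.toList.map pvCh))

-- Python A[i][j] on indices produced by range(n), always 0 ≤ i,j < n: getD is exact there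
def pvIdx (A : List (List Int)) (i j : Nat) : Int := (A.getD i []).getD j 0

def pvMatMul (A B : List (List Int)) : List (List Int) :=
  let n := A.length
  (List.range n).map (fun i => (List.range n).map (fun j =>
    ((List.range n).map (fun t => pvIdx A i t * pvIdx B t j)).sum))

def pvEye (n : Nat) : List (List Int) :=
  (List.range n).map (fun i => (List.range n).map (fun j => if i = j then (1 : Int) else 0))

-- the `while k > 0` loop of _mat_pow
def pvPowLoop (M R : List (List Int)) (k : Int) : List (List Int) :=
  if 0 < k then
    let R' := if PySem.Int.mod k 2 = 1 then pvMatMul R M else R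
    pvPowLoop (pvMatMul M M) R' (PySem.Int.floordiv k 2)
  else R
termination_by k.toNat
decreasing_by
  rw [PySem.Int.floordiv_eq_ediv_of_pos (by omega)]
  omega

def pvMatPow (M : List (List Int)) (k : Int) : List (List Int) :=
  pvPowLoop M (pvEye M.length) k

def get_string_length_alt (axiom_ : String) (rules : List (String × String)) (iterations : Int) : Int :=
  let syms := pvSymbols axiom_ rules
  if syms.length = 0 then (PySem.Str.len axiom_ : Int)
  else
    let rd : PySem.Dict String String := PySem.Dict.mk rules
    let counts : PySem.Dict String Int :=
      syms.foldl (fun d s => d.insert s (PySem.Str.count axiom_ s : Int)) PySem.Dict.empty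
    if iterations ≤ 0 then counts.values.sum
    else
      let produced := pvProdSet rd
      let prod := syms.filter (fun s => PySem.Set.contains produced s)
      let m := prod.length
      -- counts[s] with s drawn from symbols, each a key of counts: getD is exact here
      let w : List Int := prod.map (fun c =>
        (syms.map (fun s => pvYields rd c s * counts.getD s 0)).sum)
      let M : List (List Int) := prod.map (fun c => prod.map (fun d => pvYields rd c d))
      let P := pvMatPow M (iterations - 1)
      let total := ((List.range m).map (fun i =>
        ((List.range m).map (fun j => pvIdx P i j * w.getD j 0)).sum)).sum
      total + ((syms.filter (fun s => !PySem.Set.contains produced s && !rd.contains s)).map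
        (fun s => counts.getD s 0)).sum

-- ===== PRECONDITION & SPEC =====
def Spec_get_string_length (axiom_ : String) (rules : List (String × String)) (iterations : Int) (out : Int) : Prop := out = get_string_length_alt axiom_ rules iterations
instance (axiom_ : String) (rules : List (String × String)) (iterations : Int) (out : Int) : Decidable (Spec_get_string_length axiom_ rules iterations out) := by unfold Spec_get_string_length; infer_instance

-- ===== CLAIM (what is proved, stated in full; the proofs are below) =====
def Claim_equal_get_string_length : Prop := ∀ (axiom_ : String) (rules : List (String × String)) (iterations : Int), Dom_get_string_length axiom_ rules iterations → Spec_get_string_length axiom_ rules iterations (get_string_length axiom_ rules iterations)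

-- ===== LEMMAS AND PROOFS =====

-- matrix abstraction: the ambient Mathlib matrix a list-of-rows matrix denotes
def pvTM (n : Nat) (A : List (List Int)) : Matrix (Fin n) (Fin n) ℤ := fun i j => pvIdx A i j

theorem pvSum_map_range (n : Nat) (f : Nat → Int) :
    ((List.range n).map f).sum = ∑ i : Fin n, f i := by
  rw [← Finset.sum_range]
  rfl

theorem pvIdx_map_range (n : Nat) (f : Nat → Nat → Int) {i j : Nat} (hi : i < n) (hj : j < n) :
    pvIdx ((List.range n).map (fun i => (List.range n).map (f i))) i j = f i j := by
  unfold pvIdx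
  rw [PySem.List.getD_map_range (fun i => (List.range n).map (f i)) n i [] hi,
      PySem.List.getD_map_range (f i) n j 0 hj]

theorem pvLen_matMul (A B : List (List Int)) : (pvMatMul A B).length = A.length := by
  simp [pvMatMul]

theorem pvTM_matMul (n : Nat) (A B : List (List Int)) (hA : A.length = n) :
    pvTM n (pvMatMul A B) = pvTM n A * pvTM n B := by
  funext i j
  show pvIdx (pvMatMul A B) i j = _
  rw [Matrix.mul_apply]
  unfold pvMatMul
  rw [show A.length = n from hA]
  rw [pvIdx_map_range n _ i.isLt j.isLt, pvSum_map_range]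
  rfl

theorem pvTM_eye (n : Nat) : pvTM n (pvEye n) = 1 := by
  funext i j
  show pvIdx (pvEye n) i j = _
  unfold pvEye
  rw [pvIdx_map_range n _ i.isLt j.isLt, Matrix.one_apply]
  by_cases h : (i : Nat) = (j : Nat) <;> simp [h, Fin.ext_iff]

theorem pvPowLoop_spec (n : Nat) : ∀ (M R : List (List Int)) (k : Int),
    M.length = n → R.length = n →
    pvTM n (pvPowLoop M R k) = pvTM n R * (pvTM n M) ^ k.toNat ∧ (pvPowLoop M R k).length = n := by
  intro M R k
  induction M, R, k using pvPowLoop.induct with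
  | case2 M R k hk =>
    intro _ hR
    rw [pvPowLoop, if_neg hk]
    have : k.toNat = 0 := by omega
    simp [this, hR]
  | case1 M R k hk R2 ih =>
    intro hM hR
    rw [pvPowLoop, if_pos hk]
    have hMM : (pvMatMul M M).length = n := by rw [pvLen_matMul, hM]
    have hR' : (if PySem.Int.mod k 2 = 1 then pvMatMul R M else R).length = n := by
      split
      · rw [pvLen_matMul, hR]
      · exact hR
    have hR2 : R2 = if PySem.Int.mod k 2 = 1 then pvMatMul R M else R := by
      exact dite_eq_ite
    rw [hR2] at ih
    obtain ⟨h1, h2⟩ := ih hMM hR'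
    show pvTM n (pvPowLoop (pvMatMul M M)
        (if PySem.Int.mod k 2 = 1 then pvMatMul R M else R) (PySem.Int.floordiv k 2))
      = pvTM n R * pvTM n M ^ k.toNat ∧
      (pvPowLoop (pvMatMul M M)
        (if PySem.Int.mod k 2 = 1 then pvMatMul R M else R) (PySem.Int.floordiv k 2)).length = n
    refine ⟨?_, h2⟩
    rw [h1]
    have hmod : PySem.Int.mod k 2 = k % 2 := PySem.Int.mod_eq_emod_of_pos (by omega)
    have hdiv : PySem.Int.floordiv k 2 = k / 2 := PySem.Int.floordiv_eq_ediv_of_pos (by omega)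
    have hq : (PySem.Int.floordiv k 2).toNat = k.toNat / 2 := by rw [hdiv]; omega
    set q := k.toNat / 2 with hqd
    have h2q : k.toNat = 2 * q + (if PySem.Int.mod k 2 = 1 then 1 else 0) := by
      rw [hmod]; split <;> omega
    rw [hq, pvTM_matMul n M M hM, ← pow_two, ← pow_mul]
    by_cases hm : PySem.Int.mod k 2 = 1
    · rw [if_pos hm] at h2q ⊢
      rw [pvTM_matMul n R M hR, h2q, pow_succ', mul_assoc]
    · rw [if_neg hm] at h2q ⊢
      rw [h2q, Nat.add_zero]

-- the symbol list has no duplicates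
theorem pvSymbols_nodup (axiom_ : String) (rules : List (String × String)) :
    (pvSymbols axiom_ rules).Nodup := by
  unfold pvSymbols
  apply (PySem.List.sorted_perm _ _ _).nodup_iff.mpr
  have h0 : (PySem.Set.ofList (axiom_.toList.map pvCh) : PySem.Set String).Nodup :=
    PySem.Set.nodup_ofList _
  generalize PySem.Set.ofList (axiom_.toList.map pvCh) = s0 at h0 ⊢
  induction rules generalizing s0 with
  | nil => exact h0
  | cons p t ih =>
    simp only [List.foldl_cons]
    exact ih _ (PySem.Set.nodup_update _ _ (PySem.Set.nodup_add _ _ h0))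

-- dictionaries built by inserting each symbol once
theorem pvItems_insert_list (syms : List String) (f : String → Int) (hnd : syms.Nodup) :
    (syms.foldl (fun d sym => d.insert sym (f sym)) PySem.Dict.empty).items
      = syms.map (fun s => (s, f s)) := by
  have := PySem.Dict.items_foldl_insert_fresh (ν := Int) syms (fun s => s) (fun s => f s)
    PySem.Dict.empty (fun a _ => PySem.Dict.contains_empty a) (by simpa using hnd)
  simpa using this

theorem pvKeys_insert_list (syms : List String) (f : String → Int) (hnd : syms.Nodup) :
    (syms.foldl (fun d sym => d.insert sym (f sym)) PySem.Dict.empty).keys = syms := by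
  show ((syms.foldl (fun d sym => d.insert sym (f sym)) PySem.Dict.empty).items.map Prod.fst) = syms
  rw [pvItems_insert_list syms f hnd]
  simp [Function.comp_def]

theorem pvGetD_insert_list (syms : List String) (f : String → Int) (hnd : syms.Nodup)
    {s : String} (hs : s ∈ syms) :
    (syms.foldl (fun d sym => d.insert sym (f sym)) PySem.Dict.empty).getD s 0 = f s := by
  apply PySem.Dict.getD_of_mem_items
  · rw [pvItems_insert_list syms f hnd]
    exact List.mem_map.mpr ⟨s, hs, rfl⟩
  · rw [pvKeys_insert_list syms f hnd]; exact hnd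

theorem pvKeys_modify_of_contains (d : PySem.Dict String Int) (k : String) (f : Int → Int)
    (h : d.contains k = true) : (d.modify k 0 f).keys = d.keys := by
  rw [PySem.Dict.keys_modify]
  exact PySem.Dict.keys_insert_of_contains _ _ h

theorem pvContains_modify_of_contains (d : PySem.Dict String Int) (k c : String) (f : Int → Int)
    (h : d.contains k = true) : (d.modify k 0 f).contains c = d.contains c := by
  rw [PySem.Dict.contains_eq_decide_mem_keys, PySem.Dict.contains_eq_decide_mem_keys,
    pvKeys_modify_of_contains d k f h]

-- inner loop of A: distributing cur[sym] over the successor's characters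
theorem pvInner_fold (a : Int) (l : List Char) : ∀ (nc : PySem.Dict String Int),
    ((l.foldl (fun nc2 ch =>
        if nc2.contains (pvCh ch) then nc2.modify (pvCh ch) 0 (· + a) else nc2) nc).keys = nc.keys)
    ∧ ∀ c, nc.contains c = true →
      (l.foldl (fun nc2 ch =>
        if nc2.contains (pvCh ch) then nc2.modify (pvCh ch) 0 (· + a) else nc2) nc).getD c 0
        = nc.getD c 0 + a * (l.countP (fun ch => pvCh ch == c) : Int) := by
  induction l with
  | nil => intro nc; simp
  | cons ch t ih =>
    intro nc
    simp only [List.foldl_cons]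
    by_cases hc : nc.contains (pvCh ch) = true
    · rw [if_pos hc]
      set nc' := nc.modify (pvCh ch) 0 (· + a) with hnc'
      have hkeys : nc'.keys = nc.keys := pvKeys_modify_of_contains nc (pvCh ch) _ hc
      obtain ⟨ihk, ihv⟩ := ih nc'
      constructor
      · rw [ihk, hkeys]
      · intro c hcc
        have hcc' : nc'.contains c = true := by
          rwa [pvContains_modify_of_contains nc (pvCh ch) c _ hc]
        rw [ihv c hcc']
        rw [hnc', PySem.Dict.getD_modify]
        by_cases he : c = pvCh ch
        · rw [if_pos he, List.countP_cons]
          have hb : (pvCh ch == c) = true := by simp [he]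
          simp only [hb, if_true]
          rw [he]
          push_cast
          ring
        · rw [if_neg he, List.countP_cons]
          have hb : (pvCh ch == c) = false := by
            apply beq_eq_false_iff_ne.mpr
            exact fun h => he h.symm
          simp only [hb]
          simp
    · rw [if_neg hc]
      obtain ⟨ihk, ihv⟩ := ih nc
      refine ⟨ihk, ?_⟩
      intro c hcc
      rw [ihv c hcc, List.countP_cons]
      have : (pvCh ch == c) = false := by
        apply beq_eq_false_iff_ne.mpr
        intro he
        rw [he] at hc
        exact hc hcc
      rw [this]
      simp

-- outer loop of A over the source symbols
theorem pvOuter_fold (rd : PySem.Dict String String) (cur : PySem.Dict String Int) :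
    ∀ (L : List String) (nc : PySem.Dict String Int), (∀ s ∈ L, nc.contains s = true) →
    ((L.foldl (fun nc sym =>
        match rd.get? sym with
        | some succ =>
            succ.toList.foldl (fun nc2 ch =>
              if nc2.contains (pvCh ch) then nc2.modify (pvCh ch) 0 (· + cur.getD sym 0) else nc2) nc
        | none => nc.modify sym 0 (· + cur.getD sym 0)) nc).keys = nc.keys)
    ∧ ∀ c, nc.contains c = true →
      (L.foldl (fun nc sym =>
        match rd.get? sym with
        | some succ =>
            succ.toList.foldl (fun nc2 ch =>
              if nc2.contains (pvCh ch) then nc2.modify (pvCh ch) 0 (· + cur.getD sym 0) else nc2) nc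
        | none => nc.modify sym 0 (· + cur.getD sym 0)) nc).getD c 0
        = nc.getD c 0 + (L.map (fun sym => pvYields rd c sym * cur.getD sym 0)).sum := by
  intro L
  induction L with
  | nil => intro nc _; simp
  | cons sym t ih =>
    intro nc hL
    simp only [List.foldl_cons, List.map_cons, List.sum_cons]
    cases h : rd.get? sym with
    | some succ =>
      set nc' := succ.toList.foldl (fun nc2 ch =>
          if nc2.contains (pvCh ch) then nc2.modify (pvCh ch) 0 (· + cur.getD sym 0) else nc2) nc
        with hnc'
      obtain ⟨hik, hiv⟩ := pvInner_fold (cur.getD sym 0) succ.toList nc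
      have hcontains' : ∀ x, nc'.contains x = nc.contains x := by
        intro x
        rw [PySem.Dict.contains_eq_decide_mem_keys, hik, ← PySem.Dict.contains_eq_decide_mem_keys]
      obtain ⟨ihk, ihv⟩ := ih nc' (fun s hs => by rw [hcontains']; exact hL s (List.mem_cons_of_mem _ hs))
      refine ⟨by rw [ihk, hik], ?_⟩
      intro c hcc
      have hcc' : nc'.contains c = true := by rw [hcontains']; exact hcc
      rw [ihv c hcc', hiv c hcc]
      have hcoef : pvYields rd c sym = (succ.toList.countP (fun ch => pvCh ch == c) : Int) := by
        simp [pvYields, h]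
      rw [hcoef]
      ring
    | none =>
      set nc' := nc.modify sym 0 (· + cur.getD sym 0) with hnc'
      have hsym : nc.contains sym = true := hL sym List.mem_cons_self
      have hkeys : nc'.keys = nc.keys := pvKeys_modify_of_contains nc sym _ hsym
      obtain ⟨ihk, ihv⟩ := ih nc' (fun s hs => by
        rw [pvContains_modify_of_contains nc sym s _ hsym]
        exact hL s (List.mem_cons_of_mem _ hs))
      refine ⟨by rw [ihk, hkeys], ?_⟩
      intro c hcc
      have hcc' : nc'.contains c = true := by
        rwa [pvContains_modify_of_contains nc sym c _ hsym]
      rw [ihv c hcc']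
      rw [hnc', PySem.Dict.getD_modify]
      have hcoef : pvYields rd c sym = if c = sym then 1 else 0 := by simp [pvYields, h]
      rw [hcoef]
      by_cases he : c = sym
      · rw [if_pos he, if_pos he, he]; ring
      · rw [if_neg he, if_neg he]; ring

theorem pvStepA_spec (syms : List String) (rd : PySem.Dict String String)
    (cur : PySem.Dict String Int) (hnd : syms.Nodup) :
    (pvStepA syms rd cur).keys = syms
    ∧ ∀ c ∈ syms, (pvStepA syms rd cur).getD c 0
        = (syms.map (fun sym => pvYields rd c sym * cur.getD sym 0)).sum := by
  unfold pvStepA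
  set new0 : PySem.Dict String Int := syms.foldl (fun d sym => d.insert sym 0) PySem.Dict.empty
    with hnew0
  have hkeys0 : new0.keys = syms := pvKeys_insert_list syms (fun _ => 0) hnd
  have hcont0 : ∀ s ∈ syms, new0.contains s = true := by
    intro s hs
    rw [PySem.Dict.contains_eq_decide_mem_keys, hkeys0]
    simpa using hs
  obtain ⟨hk, hv⟩ := pvOuter_fold rd cur syms new0 hcont0
  refine ⟨by rw [hk, hkeys0], ?_⟩
  intro c hc
  rw [hv c (hcont0 c hc)]
  rw [pvGetD_insert_list syms (fun _ => 0) hnd hc]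
  simp

-- A's iteration as iteration of a pure linear map on count functions
def pvStepF (syms : List String) (rd : PySem.Dict String String) (g : String → Int) :
    String → Int :=
  fun c => (syms.map (fun s => pvYields rd c s * g s)).sum

def pvG (syms : List String) (rd : PySem.Dict String String) (g0 : String → Int) :
    Nat → String → Int
  | 0 => g0
  | (k+1) => pvStepF syms rd (pvG syms rd g0 k)

theorem pvAIter (syms : List String) (rd : PySem.Dict String String) (hnd : syms.Nodup)
    (g0 : String → Int) (init : PySem.Dict String Int) (hkeys : init.keys = syms)
    (hinit : ∀ c ∈ syms, init.getD c 0 = g0 c) : ∀ m : Nat,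
    (((List.range m).foldl (fun cur _ => pvStepA syms rd cur) init).keys = syms)
    ∧ ∀ c ∈ syms, ((List.range m).foldl (fun cur _ => pvStepA syms rd cur) init).getD c 0
        = pvG syms rd g0 m c := by
  intro m
  induction m with
  | zero => exact ⟨hkeys, hinit⟩
  | succ m ih =>
    obtain ⟨ih1, ih2⟩ := ih
    rw [List.range_succ, List.foldl_append]
    simp only [List.foldl_cons, List.foldl_nil]
    obtain ⟨hk, hv⟩ := pvStepA_spec syms rd _ hnd
    refine ⟨hk, ?_⟩
    intro c hc
    rw [hv c hc]
    show _ = pvStepF syms rd (pvG syms rd g0 m) c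
    unfold pvStepF
    congr 1
    apply List.map_congr_left
    intro s hs
    rw [ih2 s hs]

-- sum over a list split by a Boolean predicate
theorem pvSum_split {α : Type} (l : List α) (p : α → Bool) (f : α → Int) :
    (l.map f).sum = ((l.filter p).map f).sum + ((l.filter (fun x => !p x)).map f).sum := by
  induction l with
  | nil => simp
  | cons x t ih =>
    by_cases hx : p x = true
    · simp [hx, ih]; ring
    · simp only [List.map_cons, List.sum_cons, List.filter_cons]
      rw [if_neg (by simp [hx]), if_pos (by simp [hx])]
      simp only [List.map_cons, List.sum_cons]
      rw [ih]; ring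

-- sum of an indicator row over a duplicate-free list
theorem pvIndicator_sum (l : List String) (hnd : l.Nodup) (s : String) (hs : s ∈ l)
    (g : String → Int) :
    (l.map (fun t => (if s = t then (1 : Int) else 0) * g t)).sum = g s := by
  induction l with
  | nil => simp at hs
  | cons x t ih =>
    simp only [List.map_cons, List.sum_cons]
    rcases List.mem_cons.mp hs with h | h
    · subst h
      rw [if_pos rfl, one_mul]
      have hz : (List.map (fun t' => (if s = t' then (1 : Int) else 0) * g t') t).sum = 0 := by
        apply List.sum_eq_zero
        intro y hy
        obtain ⟨t', ht', rfl⟩ := List.mem_map.mp hy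
        rw [if_neg, zero_mul]
        intro he
        exact (List.nodup_cons.mp hnd).1 (he ▸ ht')
      rw [hz, add_zero]
    · have hsx : s ≠ x := by
        intro he
        exact (List.nodup_cons.mp hnd).1 (he ▸ h)
      rw [if_neg hsx, zero_mul, zero_add]
      exact ih (List.nodup_cons.mp hnd).2 h

-- every character of a successor lies in the produced set
theorem pvMem_prodSet (rd : PySem.Dict String String) {t succ : String}
    (h : rd.get? t = some succ) {ch : Char} (hch : ch ∈ succ.toList) :
    pvCh ch ∈ pvProdSet rd := by
  unfold pvProdSet
  rw [PySem.Set.mem_ofList]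
  apply List.mem_flatMap.mpr
  refine ⟨succ, ?_, List.mem_map.mpr ⟨ch, hch, rfl⟩⟩
  show succ ∈ rd.items.map Prod.snd
  exact List.mem_map.mpr ⟨(t, succ), PySem.Dict.mem_items_of_get?_eq_some rd h, rfl⟩

-- a symbol outside the produced set is yielded by no rule
theorem pvCountP_not_produced (rd : PySem.Dict String String) {s : String}
    (hs : s ∉ pvProdSet rd) {t succ : String} (h : rd.get? t = some succ) :
    succ.toList.countP (fun ch => pvCh ch == s) = 0 := by
  rw [List.countP_eq_zero]
  intro ch hch
  simp only [beq_iff_eq]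
  intro he
  exact hs (he ▸ pvMem_prodSet rd h hch)

-- a symbol outside the produced set that has a rule receives nothing
theorem pvStepF_dead (syms : List String) (rd : PySem.Dict String String) (s : String)
    (hs : s ∉ pvProdSet rd) (hkey : (rd.get? s).isSome) (g : String → Int) :
    pvStepF syms rd g s = 0 := by
  unfold pvStepF
  apply List.sum_eq_zero
  intro y hy
  obtain ⟨t, _, rfl⟩ := List.mem_map.mp hy
  have : pvYields rd s t = 0 := by
    unfold pvYields
    cases h : rd.get? t with
    | some succ => simp [pvCountP_not_produced rd hs h]
    | none =>
      rw [if_neg]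
      intro he
      rw [he, h] at hkey
      simp at hkey
  rw [this, zero_mul]

-- a symbol outside the produced set without a rule keeps its count
theorem pvStepF_fixed (syms : List String) (rd : PySem.Dict String String) (hnd : syms.Nodup)
    (s : String) (hs : s ∈ syms) (hprod : s ∉ pvProdSet rd) (hkey : rd.get? s = none)
    (g : String → Int) : pvStepF syms rd g s = g s := by
  unfold pvStepF
  rw [List.map_congr_left (g := fun t => (if s = t then (1 : Int) else 0) * g t) (by
    intro t _
    congr 1
    unfold pvYields
    cases h : rd.get? t with
    | some succ =>
      have hst : s ≠ t := by
        intro he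
        rw [he, h] at hkey
        simp at hkey
      show ((succ.toList.countP (fun ch => pvCh ch == s) : Nat) : Int) = if s = t then (1 : Int) else 0
      rw [pvCountP_not_produced rd hprod h, if_neg hst]
      simp
    | none => rfl)]
  exact pvIndicator_sum syms hnd s hs g

theorem pvG_dead (syms : List String) (rd : PySem.Dict String String) (g0 : String → Int)
    (s : String) (hs : s ∉ pvProdSet rd) (hkey : (rd.get? s).isSome) (k : Nat) :
    pvG syms rd g0 (k + 1) s = 0 := by
  show pvStepF syms rd (pvG syms rd g0 k) s = 0
  exact pvStepF_dead syms rd s hs hkey _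

theorem pvG_fixed (syms : List String) (rd : PySem.Dict String String) (hnd : syms.Nodup)
    (g0 : String → Int) (s : String) (hs : s ∈ syms) (hprod : s ∉ pvProdSet rd)
    (hkey : rd.get? s = none) : ∀ k : Nat, pvG syms rd g0 k s = g0 s := by
  intro k
  induction k with
  | zero => rfl
  | succ k ih =>
    show pvStepF syms rd (pvG syms rd g0 k) s = g0 s
    rw [pvStepF_fixed syms rd hnd s hs hprod hkey _, ih]

-- Set.contains is membership
theorem pvSet_contains_iff (s : PySem.Set String) (x : String) :
    PySem.Set.contains s x = true ↔ x ∈ s := by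
  simp [PySem.Set.contains]

-- after the first step the dynamics is closed on the produced symbols
theorem pvProd_restrict (syms : List String) (rd : PySem.Dict String String)
    (g0 : String → Int) : ∀ k : Nat,
    ∀ c ∈ syms.filter (fun s => PySem.Set.contains (pvProdSet rd) s),
    pvG syms rd g0 (k + 1) c
      = pvG (syms.filter (fun s => PySem.Set.contains (pvProdSet rd) s)) rd
          (pvG syms rd g0 1) k c := by
  intro k
  induction k with
  | zero => intro c _; rfl
  | succ k ih =>
    intro c hc
    have hcp : c ∈ pvProdSet rd := by
      have := (List.mem_filter.mp hc).2
      exact (pvSet_contains_iff _ _).mp this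
    show pvStepF syms rd (pvG syms rd g0 (k + 1)) c = pvStepF _ rd (pvG _ rd _ k) c
    unfold pvStepF
    rw [pvSum_split syms (fun s => PySem.Set.contains (pvProdSet rd) s)
      (fun s => pvYields rd c s * pvG syms rd g0 (k + 1) s)]
    have hout : ((syms.filter (fun x => !PySem.Set.contains (pvProdSet rd) x)).map
        (fun s => pvYields rd c s * pvG syms rd g0 (k + 1) s)).sum = 0 := by
      apply List.sum_eq_zero
      intro y hy
      obtain ⟨t, ht, rfl⟩ := List.mem_map.mp hy
      have htp : t ∉ pvProdSet rd := by
        have := (List.mem_filter.mp ht).2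
        intro hmem
        rw [Bool.not_eq_true', ← Bool.not_eq_true] at this
        exact this ((pvSet_contains_iff _ _).mpr hmem)
      cases h : rd.get? t with
      | some succ =>
        rw [pvG_dead syms rd g0 t htp (by simp [h]) k, mul_zero]
      | none =>
        have : pvYields rd c t = 0 := by
          unfold pvYields
          rw [h, if_neg]
          intro he
          exact htp (he ▸ hcp)
        rw [this, zero_mul]
    rw [hout, add_zero]
    congr 1
    apply List.map_congr_left
    intro d hd
    rw [ih d hd]

-- the closed subsystem iterated, as a matrix power
def pvMB (l : List String) (rd : PySem.Dict String String) :
    Matrix (Fin l.length) (Fin l.length) ℤ :=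
  fun i j => pvYields rd l[i] l[j]

def pvVecOf (l : List String) (g : String → Int) : Fin l.length → ℤ := fun i => g l[i]

theorem pvStepF_mulVec (l : List String) (rd : PySem.Dict String String) (g : String → Int) :
    pvVecOf l (pvStepF l rd g) = (pvMB l rd).mulVec (pvVecOf l g) := by
  funext i
  show pvStepF l rd g l[i] = _
  unfold pvStepF
  rw [← Fin.sum_univ_fun_getElem l (fun s => pvYields rd l[i] s * g s)]
  rfl

theorem pvG_mulVec (l : List String) (rd : PySem.Dict String String) (g1 : String → Int) :
    ∀ k : Nat, pvVecOf l (pvG l rd g1 k) = ((pvMB l rd) ^ k).mulVec (pvVecOf l g1) := by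
  intro k
  induction k with
  | zero => simp [pvG]
  | succ k ih =>
    show pvVecOf l (pvStepF l rd (pvG l rd g1 k)) = _
    rw [pvStepF_mulVec, ih, Matrix.mulVec_mulVec, ← pow_succ']

-- entries of a matrix built by mapping over a symbol list
theorem pvIdx_map_syms (syms : List String) (g : String → String → Int)
    (i j : Fin syms.length) :
    pvIdx (syms.map (fun si => syms.map (g si))) i j = g syms[i] syms[j] := by
  unfold pvIdx
  have h1 : (syms.map (fun si => syms.map (g si))).getD i [] = syms.map (g syms[i]) := by
    rw [List.getD_eq_getElem _ _ (by simpa using i.isLt)]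
    simp
  rw [h1, List.getD_eq_getElem _ _ (by simpa using j.isLt)]
  simp

-- ===== VERDICT (by name: the statement is the Claim_ definition above) =====
theorem get_string_length_spec : Claim_equal_get_string_length := by
  intro axiom_ rules iterations _
  unfold Spec_get_string_length
  by_cases h0 : (pvSymbols axiom_ rules).length = 0
  · simp [get_string_length, get_string_length_alt, h0]
  · set syms := pvSymbols axiom_ rules with hsyms
    set rd : PySem.Dict String String := PySem.Dict.mk rules with hrd
    have hnd : syms.Nodup := pvSymbols_nodup axiom_ rules
    set g0 : String → Int := fun s => (PySem.Str.count axiom_ s : Int) with hg0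
    set init : PySem.Dict String Int :=
      syms.foldl (fun d sym => d.insert sym (g0 sym)) PySem.Dict.empty with hinit
    set mIt := iterations.toNat with hm
    set final := (List.range mIt).foldl (fun cur _ => pvStepA syms rd cur) init with hfinal
    have hA : get_string_length axiom_ rules iterations = final.values.sum := by
      rw [get_string_length]
      simp only [← hsyms]
      rw [if_neg h0]
    have hinitK : init.keys = syms := pvKeys_insert_list syms g0 hnd
    have hinitV : ∀ c ∈ syms, init.getD c 0 = g0 c := fun c hc =>
      pvGetD_insert_list syms g0 hnd hc
    obtain ⟨hFinalK, hFinalV⟩ := pvAIter syms rd hnd g0 init hinitK hinitV mIt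
    have hAsum : final.values.sum = (syms.map (pvG syms rd g0 mIt)).sum := by
      rw [PySem.Dict.values_eq_map_keys final (by rw [hFinalK]; exact hnd) 0, hFinalK]
      congr 1
      apply List.map_congr_left
      intro s hs
      exact hFinalV s hs
    rw [hA, hAsum]
    by_cases hit : iterations ≤ 0
    · -- zero iterations on both sides (B returns the counts dictionary's value sum)
      have hm0 : mIt = 0 := by omega
      have hB : get_string_length_alt axiom_ rules iterations = init.values.sum := by
        rw [get_string_length_alt]
        simp only [← hsyms]
        rw [if_neg h0, if_pos hit]
      rw [hB, hm0]
      rw [PySem.Dict.values_eq_map_keys init (by rw [hinitK]; exact hnd) 0, hinitK]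
      apply congrArg
      apply List.map_congr_left
      intro s hs
      exact (hinitV s hs).symm
    · -- at least one iteration
      set pprod := syms.filter (fun s => PySem.Set.contains (pvProdSet rd) s) with hprod
      set n := pprod.length with hn
      set g1 : String → Int := pvG syms rd g0 1 with hg1
      set w : List Int := pprod.map (fun c =>
        (syms.map (fun s => pvYields rd c s * init.getD s 0)).sum) with hw
      set M0 : List (List Int) := pprod.map (fun c => pprod.map (fun d => pvYields rd c d))
        with hM0
      set P := pvMatPow M0 (iterations - 1) with hP
      have hB : get_string_length_alt axiom_ rules iterations
          = ((List.range n).map (fun i =>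
              ((List.range n).map (fun j => pvIdx P i j * w.getD j 0)).sum)).sum
            + ((syms.filter (fun s => !PySem.Set.contains (pvProdSet rd) s && !rd.contains s)).map
                (fun s => init.getD s 0)).sum := by
        rw [get_string_length_alt]
        simp only [← hsyms]
        rw [if_neg h0, if_neg hit]
      rw [hB]
      have hm1 : 1 ≤ mIt := by omega
      -- the seed vector is one full step of the system
      have hwg1 : w = pprod.map g1 := by
        rw [hw]
        apply List.map_congr_left
        intro c _
        show _ = pvStepF syms rd g0 c
        unfold pvStepF
        congr 1
        apply List.map_congr_left
        intro s hs
        rw [hinitV s hs]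
      -- split A's sum into the produced and the never-produced symbols
      rw [pvSum_split syms (fun s => PySem.Set.contains (pvProdSet rd) s) (pvG syms rd g0 mIt)]
      -- never-produced symbols: rule keys died after the first step, the rest never moved
      have hlong : ((syms.filter (fun x => !PySem.Set.contains (pvProdSet rd) x)).map
            (pvG syms rd g0 mIt)).sum
          = ((syms.filter (fun s => !PySem.Set.contains (pvProdSet rd) s && !rd.contains s)).map
              (fun s => init.getD s 0)).sum := by
        rw [pvSum_split _ (fun s => rd.contains s) (pvG syms rd g0 mIt)]
        have hdead : (((syms.filter (fun x => !PySem.Set.contains (pvProdSet rd) x)).filter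
            (fun s => rd.contains s)).map (pvG syms rd g0 mIt)).sum = 0 := by
          apply List.sum_eq_zero
          intro y hy
          obtain ⟨t, ht, rfl⟩ := List.mem_map.mp hy
          have h1 := (List.mem_filter.mp ht).2
          have h2 := (List.mem_filter.mp (List.mem_filter.mp ht).1).2
          have htp : t ∉ pvProdSet rd := by
            intro hmem
            rw [Bool.not_eq_true', ← Bool.not_eq_true] at h2
            exact h2 ((pvSet_contains_iff _ _).mpr hmem)
          have hkey : (rd.get? t).isSome := by
            rw [PySem.Dict.contains_eq_isSome_get?] at h1
            exact h1
          obtain ⟨m', hm'⟩ : ∃ m', mIt = m' + 1 := ⟨mIt - 1, by omega⟩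
          rw [hm']
          exact pvG_dead syms rd g0 t htp hkey m'
        rw [hdead, zero_add]
        have hsame : (((syms.filter (fun x => !PySem.Set.contains (pvProdSet rd) x)).filter
              (fun s => !rd.contains s)).map (pvG syms rd g0 mIt)).sum
            = (((syms.filter (fun x => !PySem.Set.contains (pvProdSet rd) x)).filter
              (fun s => !rd.contains s)).map (fun s => init.getD s 0)).sum := by
          congr 1
          apply List.map_congr_left
          intro t ht
          have h1 := (List.mem_filter.mp ht).2
          have hmem := List.mem_filter.mp (List.mem_filter.mp ht).1
          have htp : t ∉ pvProdSet rd := by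
            intro hmemp
            have h2 := hmem.2
            rw [Bool.not_eq_true', ← Bool.not_eq_true] at h2
            exact h2 ((pvSet_contains_iff _ _).mpr hmemp)
          have hkey : rd.get? t = none := by
            rw [PySem.Dict.get?_eq_none_iff_contains]
            simpa using h1
          rw [pvG_fixed syms rd hnd g0 t hmem.1 htp hkey mIt, hinitV t hmem.1]
        rw [hsame, List.filter_filter]
        have hcomm : List.filter (fun a => !rd.contains a && !(pvProdSet rd).contains a) syms
            = List.filter (fun s => !PySem.Set.contains (pvProdSet rd) s && !rd.contains s) syms :=
          List.filter_congr (fun a _ => Bool.and_comm _ _)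
        rw [hcomm]
      rw [hlong]
      congr 1
      -- the produced symbols: the small matrix power applied to the seed
      have hrestrict : ∀ c ∈ pprod, pvG syms rd g0 mIt c = pvG pprod rd g1 (mIt - 1) c := by
        intro c hc
        obtain ⟨m', hm'⟩ : ∃ m', mIt = m' + 1 := ⟨mIt - 1, by omega⟩
        rw [hm', Nat.add_sub_cancel]
        exact pvProd_restrict syms rd g0 m' c hc
      have hshort : ((syms.filter (fun s => PySem.Set.contains (pvProdSet rd) s)).map
            (pvG syms rd g0 mIt)).sum = (pprod.map (pvG pprod rd g1 (mIt - 1))).sum := by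
        rw [← hprod]
        congr 1
        exact List.map_congr_left hrestrict
      rw [hshort]
      -- bridge to the computed double sum
      have hTM0 : pvTM n M0 = pvMB pprod rd := by
        funext i j
        show pvIdx M0 i j = pvYields rd pprod[i] pprod[j]
        rw [hM0, pvIdx_map_syms pprod _ i j]
      have hM0len : M0.length = n := by rw [hM0, List.length_map, ← hn]
      have hEyeLen : (pvEye M0.length).length = n := by simp [pvEye, hM0len]
      obtain ⟨hPow, _⟩ := pvPowLoop_spec n M0 (pvEye M0.length) (iterations - 1) hM0len hEyeLen
      have hexp : (iterations - 1).toNat = mIt - 1 := by omega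
      have hTP : pvTM n P = (pvMB pprod rd) ^ (mIt - 1) := by
        rw [hP, pvMatPow, hPow, hM0len, pvTM_eye, one_mul, hTM0, hexp]
      have hwv : ∀ j : Fin n, w.getD (j : Nat) 0 = pvVecOf pprod g1 j := by
        intro j
        have hj : (j : Nat) < (pprod.map g1).length := by
          rw [List.length_map]; exact j.isLt
        rw [hwg1, List.getD_eq_getElem _ _ hj, List.getElem_map]
        rfl
      rw [← Fin.sum_univ_fun_getElem pprod (pvG pprod rd g1 (mIt - 1)), pvSum_map_range]
      apply Finset.sum_congr rfl
      intro i _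
      rw [pvSum_map_range]
      have hrow : (∑ j : Fin n, pvIdx P (i : Nat) (j : Nat) * w.getD (j : Nat) 0)
          = ∑ j : Fin n, pvTM n P i j * pvVecOf pprod g1 j := by
        apply Finset.sum_congr rfl
        intro j _
        rw [hwv j]
        rfl
      rw [hrow,
        show (∑ j : Fin n, pvTM n P i j * pvVecOf pprod g1 j)
          = ((pvTM n P).mulVec (pvVecOf pprod g1)) i from rfl,
        hTP, ← pvG_mulVec]
      rfl
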